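-- pv_equiv track=rewrite | github.com/moorts/AoC | 2018/src/day5/solve.py | solve
-- ===== SOURCE A (Python) =====
-- def solve(data):
--     m = len(data)
--     for c in set(data.lower()):
--         polymer = ''.join(filter(lambda x: x.lower() != c, data))
--         reacted = react(polymer)
--         old = polymer
--         while reacted != old:
--             old = reacted
--             reacted = react(reacted)
--         if len(reacted) < m:
--             m = len(reacted)
--     return m
--
-- def react(polymer):
--     i = 0
--     out = ""
--     while i < len(polymer):
--         if i == len(polymer)-1:
--             out += polymer[i]
--             break
--         if abs(ord(polymer[i]) - ord(polymer[i+1])) == 32: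
--             # react
--             i += 1
--         else:
--             out += polymer[i]
--         i += 1
--     return out
-- ===== SOURCE B (Python) =====
-- def solve(data):
--     # Single-pass stack reduction per candidate letter: O(26*n) instead of
--     # O(26*n^2) repeated rescanning passes.
--     def reduced_len(p):
--         st = []
--         for x in p:
--             if st and abs(ord(st[-1]) - ord(x)) == 32:
--                 st.pop()
--             else:
--                 st.append(x)
--         return len(st)
--
--     return min([len(data)] +
--                [reduced_len([x for x in data if x.lower() != c])
--                 for c in set(data.lower())])
-- ===== Notes on version B (the rewrite author's own statement) =====
-- stated objective: faster
-- what changed: Replaces A's repeated full react-passes-to-fixpoint per candidate letter with a single left-to-right stack reduction per candidate letter; this is exact on printable input because there the ord-difference-32 reaction graph, after identifying the interchangeable chain endpoints c and c+64, is a perfect matching, making pair deletion confluent.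
-- outside the precondition, e.g. on solve('\t\t))Ii*'): A returns 1, B returns 0
import Mathlib
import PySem

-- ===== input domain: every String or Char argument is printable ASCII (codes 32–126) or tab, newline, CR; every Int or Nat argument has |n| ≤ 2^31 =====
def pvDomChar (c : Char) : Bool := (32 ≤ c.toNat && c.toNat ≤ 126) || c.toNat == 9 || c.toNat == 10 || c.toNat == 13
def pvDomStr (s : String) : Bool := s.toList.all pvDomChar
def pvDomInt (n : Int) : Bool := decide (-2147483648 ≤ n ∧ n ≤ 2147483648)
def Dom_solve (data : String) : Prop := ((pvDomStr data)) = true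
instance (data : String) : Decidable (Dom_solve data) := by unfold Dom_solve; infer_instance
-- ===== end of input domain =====

-- B replaces A's repeated react-passes-to-fixpoint per candidate letter with a single
-- left-to-right stack reduction per candidate letter (O(26·n) passes over the data instead
-- of O(26·n²)); exact on printable input, where the ord-difference-32 reaction relation is
-- confluent (Pre_ excludes tab/newline/CR, whose longer reaction chains make A's result
-- depend on its pass order).

-- ===== PORT A =====

-- react(polymer): while loop over index i; at the last char append it; on a reacting
-- adjacent pair skip both; otherwise append the current char.
def reactA : List Char → List Char
  | [] => []
  | [a] => [a]
  | a :: b :: t =>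
    if ((a.toNat : Int) - (b.toNat : Int)).natAbs == 32 then reactA t
    else a :: reactA (b :: t)
  termination_by p => p.length

-- termination lemmas for the fixpoint loop (cited by decreasing_by below)
theorem reactA_length_le (p : List Char) : (reactA p).length ≤ p.length := by
  fun_induction reactA p with
  | case1 => simp
  | case2 => simp
  | case3 a b t h ih => simp; omega
  | case4 a b t h ih => simp at ih ⊢; omega

theorem reactA_length_lt_of_ne (p : List Char) (h : reactA p ≠ p) :
    (reactA p).length < p.length := by
  have hle := reactA_length_le p
  rcases Nat.lt_or_ge (reactA p).length p.length with hlt | hge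
  · exact hlt
  · exfalso
    have heq : (reactA p).length = p.length := Nat.le_antisymm hle hge
    clear hle hge
    induction p with
    | nil => exact h (by rw [reactA])
    | cons a t ihp =>
      match t, heq, h with
      | [], _, h => exact h (by rw [reactA])
      | b :: t, heq, h =>
        by_cases hp : ((a.toNat : Int) - (b.toNat : Int)).natAbs == 32
        · rw [show reactA (a :: b :: t) = reactA t from by simp [reactA, hp]] at heq
          have := reactA_length_le t
          simp at heq; omega
        · rw [show reactA (a :: b :: t) = a :: reactA (b :: t) from by
            simp [reactA, hp]] at heq h
          exact ihp (fun he => h (by rw [he])) (by simpa using heq)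

-- old = polymer; reacted = react(polymer); while reacted != old: old, reacted = reacted, react(reacted)
def fixA (p : List Char) : List Char :=
  let r := reactA p
  if h : r = p then r else fixA r
  termination_by p.length
  decreasing_by exact reactA_length_lt_of_ne p h

-- m = len(data); for c in set(data.lower()): m = min-update over the fully reacted filtered polymer
def solve (data : String) : Int :=
  let ds := data.toList
  let m0 : Int := ds.length
  (PySem.Set.ofList (PySem.Chars.lower ds)).foldl
    (fun m c =>
      let polymer := ds.filter (fun x => PySem.Chars.lowerChar x != c)
      let reacted := fixA polymer
      if (reacted.length : Int) < m then (reacted.length : Int) else m)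
    m0

-- ===== PORT B =====

-- the inner loop of reduced_len: push x, or pop the matching top of the stack
-- (stack kept most-recent-first, the mirror of Python's list tail)
def stackStep (st : List Char) (x : Char) : List Char :=
  match st with
  | [] => [x]
  | t :: r => if ((t.toNat : Int) - (x.toNat : Int)).natAbs == 32 then r else x :: t :: r

-- min([len(data)] + [reduced_len(filtered) for c in set(data.lower())])
def solve_alt (data : String) : Int :=
  let ds := data.toList
  let lengths : List Int :=
    (ds.length : Int) ::
      (PySem.Set.ofList (PySem.Chars.lower ds)).map
        (fun c => (((ds.filter (fun x => PySem.Chars.lowerChar x != c)).foldl stackStep []).length : Int))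
  (PySem.List.min? lengths (fun x => x)).getD 0  -- lengths is a cons, so min? is never none

-- ===== PRECONDITION & SPEC =====
-- Pre_ excludes strings containing tab/newline/CR (the only Dom chars below 32): there the
-- ord-difference-32 reaction chains grow to length 4, pair deletion stops being confluent,
-- and A's result is an artifact of its pass order — a corner the puzzle's reaction rule
-- leaves unspecified.
def Pre_solve (data : String) : Prop := (data.toList.all (fun c => 32 ≤ c.toNat)) = true
instance (data : String) : Decidable (Pre_solve data) := by unfold Pre_solve; infer_instance
def pvWitness_solve : String := "dabA"

def Spec_solve (data : String) (out : Int) : Prop := out = solve_alt data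
instance (data : String) (out : Int) : Decidable (Spec_solve data out) := by unfold Spec_solve; infer_instance

-- ===== CLAIM (what is proved, stated in full; the proofs are below) =====
def Claim_equal_solve : Prop := ∀ (data : String), Dom_solve data → Pre_solve data → Spec_solve data (solve data)

-- ===== LEMMAS AND PROOFS =====


-- ---- Nat-level mirrors of both reductions (proof-only helpers) ----

def reactN : List Nat → List Nat
  | [] => []
  | [a] => [a]
  | a :: b :: t =>
    if ((a : Int) - (b : Int)).natAbs == 32 then reactN t
    else a :: reactN (b :: t)
  termination_by p => p.length

theorem reactN_length_le (p : List Nat) : (reactN p).length ≤ p.length := by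
  fun_induction reactN p with
  | case1 => simp
  | case2 => simp
  | case3 a b t h ih => simp; omega
  | case4 a b t h ih => simp at ih ⊢; omega

theorem reactN_length_lt_of_ne (p : List Nat) (h : reactN p ≠ p) :
    (reactN p).length < p.length := by
  have hle := reactN_length_le p
  rcases Nat.lt_or_ge (reactN p).length p.length with hlt | hge
  · exact hlt
  · exfalso
    have heq : (reactN p).length = p.length := Nat.le_antisymm hle hge
    clear hle hge
    induction p with
    | nil => exact h (by rw [reactN])
    | cons a t ihp =>
      match t, heq, h with
      | [], _, h => exact h (by rw [reactN])
      | b :: t, heq, h =>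
        by_cases hp : ((a : Int) - (b : Int)).natAbs == 32
        · rw [show reactN (a :: b :: t) = reactN t from by simp [reactN, hp]] at heq
          have := reactN_length_le t
          simp at heq; omega
        · rw [show reactN (a :: b :: t) = a :: reactN (b :: t) from by
            simp [reactN, hp]] at heq h
          exact ihp (fun he => h (by rw [he])) (by simpa using heq)

def fixN (p : List Nat) : List Nat :=
  let r := reactN p
  if h : r = p then r else fixN r
  termination_by p.length
  decreasing_by exact reactN_length_lt_of_ne p h

def stepN (st : List Nat) (x : Nat) : List Nat :=
  match st with
  | [] => [x]
  | t :: r => if ((t : Int) - (x : Int)).natAbs == 32 then r else x :: t :: r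

-- ---- transfer Char → Nat ----

theorem reactA_toN (s : List Char) :
    (reactA s).map Char.toNat = reactN (s.map Char.toNat) := by
  fun_induction reactA s with
  | case1 => simp [reactN]
  | case2 => simp [reactN]
  | case3 a b t h ih => simp [reactN, h, ih]
  | case4 a b t h ih => simp at h; simp [reactN, h, ih]

theorem reactN_eq_of_length_eq (p : List Nat) (h : (reactN p).length = p.length) :
    reactN p = p := by
  by_contra hne
  exact absurd h (Nat.ne_of_lt (reactN_length_lt_of_ne p hne))

theorem fixA_toN (s : List Char) :
    (fixA s).map Char.toNat = fixN (s.map Char.toNat) := by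
  induction hn : s.length using Nat.strong_induction_on generalizing s with
  | _ n ih =>
    subst hn
    rw [fixA.eq_def, fixN.eq_def]
    simp only []
    by_cases h : reactA s = s
    · rw [dif_pos h, dif_pos (by rw [← reactA_toN, h]), reactA_toN]
    · have h2 : reactN (s.map Char.toNat) ≠ s.map Char.toNat := by
        intro he
        have hlen : (reactA s).length = s.length := by
          have := congrArg List.length he
          rw [← reactA_toN] at this
          simpa using this
        exact h (by
          by_contra hne
          exact absurd hlen (Nat.ne_of_lt (reactA_length_lt_of_ne s hne)))
      rw [dif_neg h, dif_neg h2, ← reactA_toN,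
        ih (reactA s).length (reactA_length_lt_of_ne s h) (reactA s) rfl]

theorem stack_toN (s : List Char) (st : List Char) :
    (s.foldl stackStep st).map Char.toNat
      = (s.map Char.toNat).foldl stepN (st.map Char.toNat) := by
  induction s generalizing st with
  | nil => rfl
  | cons a s ih =>
    have hstep : (stackStep st a).map Char.toNat
        = stepN (st.map Char.toNat) a.toNat := by
      cases st with
      | nil => rfl
      | cons t r => by_cases h : ((t.toNat : Int) - (a.toNat : Int)).natAbs == 32 <;>
          simp [stackStep, stepN, h]
    simp [List.foldl_cons, ih, hstep]

-- ---- collapsing the two interchangeable chain endpoints: kN n sends n ≥ 96 to n - 64 ----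

def kN (n : Nat) : Nat := if 96 ≤ n then n - 64 else n

def PrN (n : Nat) : Prop := 32 ≤ n ∧ n ≤ 126
def GdN (n : Nat) : Prop := 32 ≤ n ∧ n ≤ 95

theorem kN_good {n : Nat} (h : PrN n) : GdN (kN n) := by
  unfold PrN GdN kN at *; split <;> omega

-- on printable codes the reaction test factors through kN
theorem MkP {a b : Nat} (ha : PrN a) (hb : PrN b) :
    ((kN a : Int) - (kN b : Int)).natAbs = 32 ↔ ((a : Int) - (b : Int)).natAbs = 32 := by
  unfold PrN kN at *; split_ifs <;> omega

theorem Msymm {a b : Nat} : ((a : Int) - (b : Int)).natAbs = 32 ↔ ((b : Int) - (a : Int)).natAbs = 32 := by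
  omega

-- in the collapsed alphabet every code has at most one reaction partner
theorem Muniq {x a b : Nat} (hx : GdN x) (ha : GdN a) (hb : GdN b)
    (h1 : ((x : Int) - (a : Int)).natAbs = 32) (h2 : ((a : Int) - (b : Int)).natAbs = 32) :
    x = b := by
  unfold GdN at *; omega

theorem stepN_mem {st : List Nat} {x n : Nat} (h : n ∈ stepN st x) : n ∈ x :: st := by
  cases st with
  | nil => simpa [stepN] using h
  | cons t r =>
    by_cases hm : ((t : Int) - (x : Int)).natAbs == 32 <;>
      simp [stepN, hm] at h <;> simp <;> tauto

theorem reactN_subset {n : Nat} {s : List Nat} (h : n ∈ reactN s) : n ∈ s := by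
  fun_induction reactN s with
  | case1 => simp at h
  | case2 => simpa using h
  | case3 a b t hm ih => simp [ih h]
  | case4 a b t hm ih =>
    simp at h
    rcases h with h | h
    · simp [h]
    · have := ih h; simp at this ⊢; tauto

theorem reactN_map_k {s : List Nat} (hs : ∀ n ∈ s, PrN n) :
    reactN (s.map kN) = (reactN s).map kN := by
  fun_induction reactN s with
  | case1 => simp [reactN]
  | case2 => simp [reactN]
  | case3 a b t h ih =>
    simp only [beq_iff_eq] at h
    have hk := (MkP (hs a (by simp)) (hs b (by simp))).mpr h
    simp [reactN, hk, ih (fun n hn => hs n (by simp [hn]))]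
  | case4 a b t h ih =>
    simp only [beq_iff_eq] at h
    have hk : ¬ ((kN a : Int) - (kN b : Int)).natAbs = 32 :=
      fun hc => h ((MkP (hs a (by simp)) (hs b (by simp))).mp hc)
    have ihx := ih (fun n hn => hs n (by simp at hn ⊢; tauto))
    simp only [List.map_cons] at ihx ⊢
    rw [show reactN (kN a :: kN b :: List.map kN t) = kN a :: reactN (kN b :: List.map kN t)
        from by simp [reactN, hk], ihx]

theorem fixN_map_k {s : List Nat} (hs : ∀ n ∈ s, PrN n) :
    fixN (s.map kN) = (fixN s).map kN := by
  induction hn : s.length using Nat.strong_induction_on generalizing s with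
  | _ n ih =>
    subst hn
    rw [fixN.eq_def (s.map kN), fixN.eq_def s]
    simp only []
    by_cases h : reactN s = s
    · rw [dif_pos h, dif_pos (by rw [reactN_map_k hs, h]), reactN_map_k hs, h]
    · have h2 : reactN (s.map kN) ≠ s.map kN := by
        intro he
        rw [reactN_map_k hs] at he
        have hlen : (reactN s).length = s.length := by
          have := congrArg List.length he; simpa using this
        exact h (reactN_eq_of_length_eq s hlen)
      rw [dif_neg h, dif_neg h2, reactN_map_k hs,
        ih (reactN s).length (reactN_length_lt_of_ne s h)
          (fun n hn => hs n (reactN_subset hn)) rfl]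

theorem stepN_map_k {st : List Nat} {x : Nat} (hst : ∀ n ∈ st, PrN n) (hx : PrN x) :
    stepN (st.map kN) (kN x) = (stepN st x).map kN := by
  cases st with
  | nil => rfl
  | cons t r =>
    have ht : PrN t := hst t (by simp)
    by_cases hm : ((t : Int) - (x : Int)).natAbs = 32
    · simp [stepN, hm, (MkP ht hx).mpr hm]
    · have hk : ¬ ((kN t : Int) - (kN x : Int)).natAbs = 32 := fun hc => hm ((MkP ht hx).mp hc)
      simp [stepN, hm, hk]

theorem stack_map_k {s st : List Nat} (hs : ∀ n ∈ s, PrN n) (hst : ∀ n ∈ st, PrN n) :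
    (s.map kN).foldl stepN (st.map kN) = (s.foldl stepN st).map kN := by
  induction s generalizing st with
  | nil => rfl
  | cons a s ih =>
    have ha : PrN a := hs a (by simp)
    have hnext : ∀ n ∈ stepN st a, PrN n := fun n hn => by
      have hmem := stepN_mem hn; simp at hmem
      rcases hmem with h | h
      · exact h ▸ ha
      · exact hst n h
    simp only [List.map_cons, List.foldl_cons, stepN_map_k hst ha]
    exact ih (fun n hn => hs n (by simp [hn])) hnext

-- ---- the confluence core, over the collapsed (perfect-matching) alphabet ----

def IrrN (st : List Nat) : Prop :=
  List.IsChain (fun (a b : Nat) => ¬ ((a : Int) - (b : Int)).natAbs = 32) st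

theorem stepN_irr {st : List Nat} {x : Nat} (h : IrrN st) : IrrN (stepN st x) := by
  cases st with
  | nil => simp [stepN, IrrN]
  | cons t r =>
    by_cases hm : ((t : Int) - (x : Int)).natAbs == 32
    · rw [show stepN (t :: r) x = r from by simp [stepN, hm]]
      exact h.tail
    · rw [show stepN (t :: r) x = x :: t :: r from by simp [stepN, hm]]
      rw [IrrN, List.isChain_cons_cons]
      have hm2 : ¬ ((t : Int) - (x : Int)).natAbs = 32 := by simpa using hm
      exact ⟨fun hc => hm2 (Msymm.mp hc), h⟩

-- an adjacent reacting pair fed to the stack cancels exactly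
theorem stepN_cancel {st : List Nat} {a b : Nat}
    (hirr : IrrN st) (hg : ∀ n ∈ st, GdN n) (ha : GdN a) (hb : GdN b)
    (hm : ((a : Int) - (b : Int)).natAbs = 32) :
    stepN (stepN st a) b = st := by
  cases st with
  | nil =>
    show stepN [a] b = []
    simp [stepN, hm]
  | cons t r =>
    have ht : GdN t := hg t (by simp)
    by_cases hta : ((t : Int) - (a : Int)).natAbs == 32
    · rw [show stepN (t :: r) a = r from by simp [stepN, hta]]
      have htb : t = b := Muniq ht ha hb (by simpa using hta) hm
      cases r with
      | nil => simp [stepN, htb]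
      | cons u v =>
        have hnt : ¬ ((u : Int) - (t : Int)).natAbs = 32 := by
          rw [IrrN, List.isChain_cons_cons] at hirr
          exact fun hc => hirr.1 (Msymm.mp hc)
        have hub : ¬ ((u : Int) - (b : Int)).natAbs = 32 := htb ▸ hnt
        rw [show stepN (u :: v) b = b :: u :: v from by simp [stepN, hub], htb]
    · rw [show stepN (t :: r) a = a :: t :: r from by simp [stepN, hta]]
      simp [stepN, hm]

-- one whole react pass leaves the stack fold unchanged
theorem pass_pres (s : List Nat) : ∀ st : List Nat,
    (∀ n ∈ s, GdN n) → (∀ n ∈ st, GdN n) → IrrN st →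
    (reactN s).foldl stepN st = s.foldl stepN st := by
  fun_induction reactN s with
  | case1 => intro st _ _ _; rfl
  | case2 => intro st _ _ _; rfl
  | case3 a b t hm ih =>
    intro st hg hst hirr
    rw [show (a :: b :: t).foldl stepN st = t.foldl stepN (stepN (stepN st a) b) from rfl,
      stepN_cancel hirr hst (hg a (by simp)) (hg b (by simp)) (by simpa using hm)]
    exact ih st (fun n hn => hg n (by simp at hn ⊢; tauto)) hst hirr
  | case4 a b t hm ih =>
    intro st hg hst hirr
    have hg2 : ∀ n ∈ stepN st a, GdN n := fun n hn => by
      have := stepN_mem hn; simp at this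
      rcases this with hh | hh
      · exact hh ▸ hg a (by simp)
      · exact hst n hh
    rw [show (a :: reactN (b :: t)).foldl stepN st
        = (reactN (b :: t)).foldl stepN (stepN st a) from rfl,
      ih (stepN st a) (fun n hn => hg n (by simp at hn ⊢; tauto)) hg2 (stepN_irr hirr)]
    rfl

theorem fix_pres (s : List Nat) (hs : ∀ n ∈ s, GdN n) :
    (fixN s).foldl stepN [] = s.foldl stepN [] := by
  induction hn : s.length using Nat.strong_induction_on generalizing s with
  | _ n ih =>
    subst hn
    rw [fixN.eq_def]
    simp only []
    by_cases h : reactN s = s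
    · rw [dif_pos h, h]
    · rw [dif_neg h,
        ih (reactN s).length (reactN_length_lt_of_ne s h) (reactN s)
          (fun m hm => hs m (reactN_subset hm)) rfl]
      exact pass_pres s [] hs (by simp) (by simp [IrrN])

theorem fixN_fixed (s : List Nat) : reactN (fixN s) = fixN s := by
  induction hn : s.length using Nat.strong_induction_on generalizing s with
  | _ n ih =>
    subst hn
    rw [fixN.eq_def]
    simp only []
    by_cases h : reactN s = s
    · rw [dif_pos h, h, h]
    · rw [dif_neg h]
      exact ih (reactN s).length (reactN_length_lt_of_ne s h) (reactN s) rfl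

theorem irr_of_fixed (u : List Nat) (h : reactN u = u) : IrrN u := by
  induction u with
  | nil => simp [IrrN]
  | cons a t iht =>
    match t, h with
    | [], _ => simp [IrrN]
    | b :: t, h =>
      by_cases hm : ((a : Int) - (b : Int)).natAbs == 32
      · exfalso
        rw [show reactN (a :: b :: t) = reactN t from by simp [reactN, hm]] at h
        have h1 := reactN_length_le t
        have h2 := congrArg List.length h
        simp at h2; omega
      · rw [show reactN (a :: b :: t) = a :: reactN (b :: t) from by simp [reactN, hm]] at h
        simp only [List.cons.injEq] at h
        have := iht h.2
        simp only [IrrN] at this ⊢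
        cases t with
        | nil => simp; simpa using hm
        | cons c u =>
          rw [List.isChain_cons_cons]
          exact ⟨by simpa using hm, this⟩

theorem eval_irr (u : List Nat) : ∀ st : List Nat, IrrN u →
    (match u, st with
      | a :: _, t :: _ => ¬ ((t : Int) - (a : Int)).natAbs = 32
      | _, _ => True) →
    u.foldl stepN st = u.reverse ++ st := by
  induction u with
  | nil => intro st _ _; rfl
  | cons a u ih =>
    intro st hirr hif
    have hstep : stepN st a = a :: st := by
      cases st with
      | nil => rfl
      | cons t r => simp only at hif; simp [stepN, hif]
    rw [show (a :: u).foldl stepN st = u.foldl stepN (stepN st a) from rfl, hstep,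
      ih (a :: st) hirr.tail (by
        cases u with
        | nil => trivial
        | cons b v =>
          rw [IrrN, List.isChain_cons_cons] at hirr
          exact hirr.1)]
    simp

theorem core_good {t : List Nat} (ht : ∀ n ∈ t, GdN n) :
    t.foldl stepN [] = (fixN t).reverse := by
  rw [← fix_pres t ht,
    eval_irr (fixN t) [] (irr_of_fixed (fixN t) (fixN_fixed t)) (by
      cases h : fixN t <;> trivial)]
  simp

-- ---- the per-polymer length equality, back at Char level ----

theorem main_len {s : List Char} (hs : ∀ c ∈ s, 32 ≤ c.toNat ∧ c.toNat ≤ 126) :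
    ((s.foldl stackStep []).length : Int) = ((fixA s).length : Int) := by
  have hPr : ∀ n ∈ s.map Char.toNat, PrN n := by
    intro n hn
    obtain ⟨c, hc, rfl⟩ := List.mem_map.mp hn
    exact hs c hc
  have hgood : ∀ n ∈ (s.map Char.toNat).map kN, GdN n := by
    intro n hn
    rw [List.map_map] at hn
    obtain ⟨c, hc, rfl⟩ := List.mem_map.mp hn
    exact kN_good (hs c hc)
  have h3 : ((s.map Char.toNat).map kN).foldl stepN []
      = ((s.map Char.toNat).foldl stepN []).map kN := by
    simpa using stack_map_k (st := []) hPr (by simp)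
  have h4 := core_good hgood
  have h5 := fixN_map_k hPr
  have h6 := fixA_toN s
  have e1 : (s.foldl stackStep []).map Char.toNat = (s.map Char.toNat).foldl stepN [] := by
    simpa using stack_toN s []
  have key : (s.foldl stackStep []).length = (fixA s).length := by
    calc (s.foldl stackStep []).length
        = ((s.foldl stackStep []).map Char.toNat).length := by simp
      _ = ((s.map Char.toNat).foldl stepN []).length := by rw [e1]
      _ = (((s.map Char.toNat).foldl stepN []).map kN).length := by simp
      _ = (((s.map Char.toNat).map kN).foldl stepN []).length :=
        (congrArg List.length h3).symm
      _ = ((fixN ((s.map Char.toNat).map kN)).reverse).length := congrArg List.length h4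
      _ = ((fixN (s.map Char.toNat)).map kN).length := by rw [List.length_reverse, h5]
      _ = (fixN (s.map Char.toNat)).length := by simp
      _ = ((fixA s).map Char.toNat).length := by rw [h6]
      _ = (fixA s).length := by simp
  exact_mod_cast key

-- a running-minimum fold equals min over the collected values
theorem foldl_min_update (v : Char → Int) (L : List Char) (m0 : Int) :
    L.foldl (fun m c => if v c < m then v c else m) m0
      = (L.map v).foldl min m0 := by
  induction L generalizing m0 with
  | nil => rfl
  | cons c t ih =>
    simp only [List.foldl_cons, List.map_cons, ih]
    congr 1
    by_cases h : v c < m0 <;> simp [min_def] <;> omega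


-- ===== VERDICT (by name: the statement is the Claim_ definition above) =====
theorem solve_spec : Claim_equal_solve := by
  intro data hdom hpre
  have hchar : ∀ c ∈ data.toList, 32 ≤ c.toNat ∧ c.toNat ≤ 126 := by
    intro c hc
    have hd : pvDomChar c = true := by
      have := hdom
      unfold Dom_solve pvDomStr at this
      rw [List.all_eq_true] at this
      exact this c hc
    have hp : 32 ≤ c.toNat := by
      rw [Pre_solve, List.all_eq_true] at hpre
      simpa using hpre c hc
    simp [pvDomChar] at hd
    omega
  unfold Spec_solve solve solve_alt
  simp only [PySem.Chars.lower]
  rw [PySem.List.min?_id_cons]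
  simp only [Option.getD_some]
  rw [foldl_min_update
    (fun c => ((fixA (data.toList.filter (fun x => PySem.Chars.lowerChar x != c))).length : Int))
    (PySem.Set.ofList (data.toList.map PySem.Chars.lowerChar)) (data.toList.length : Int)]
  congr 1
  refine List.map_congr_left ?_
  intro c _
  exact (main_len (fun x hx => hchar x (List.mem_filter.mp hx).1)).symm
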